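-- pv_equiv track=rewrite | github.com/nathanielce24/Flask-Web-App-for-Transposing-Chord-Progressions | src/transpose.py | nextRoot
-- ===== SOURCE A (Python) =====
-- sharps = ["G", "G#", "A", "A#", "B", "C", "C#", "D", "D#", "E", "F", "F#"]
--
-- flats = ["G", "Ab", "A", "Bb", "B", "C", "Db", "D", "Eb", "E", "F", "Gb"]
--
-- def nextRoot(root, direction, interval):  #Finds next root noe
--      notes = []
--      if "b" in root: notes = flats
--      else: notes = sharps
--      if direction == "Down": interval = 12 - interval
--      for _ in range(interval):
--         root = notes[(notes.index(root)+1)%len(notes)]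
--      return root
-- ===== SOURCE B (Python) =====
-- sharps = ["G", "G#", "A", "A#", "B", "C", "C#", "D", "D#", "E", "F", "F#"]
--
-- flats = ["G", "Ab", "A", "Bb", "B", "C", "Db", "D", "Eb", "E", "F", "Gb"]
--
-- def nextRoot(root, direction, interval):
--     notes = flats if "b" in root else sharps
--     steps = 12 - interval if direction == "Down" else interval
--     if steps <= 0:
--         return root
--     return notes[(notes.index(root) + steps) % 12]
-- ===== Notes on version B (the rewrite author's own statement) =====
-- stated objective: simpler
-- what changed: Replaces A's step-by-step loop (one notes.index + list lookup per semitone) by a single closed-form modular lookup notes[(notes.index(root)+steps)%12], with steps<=0 returning root unchanged as A's empty loop does.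
import Mathlib
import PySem

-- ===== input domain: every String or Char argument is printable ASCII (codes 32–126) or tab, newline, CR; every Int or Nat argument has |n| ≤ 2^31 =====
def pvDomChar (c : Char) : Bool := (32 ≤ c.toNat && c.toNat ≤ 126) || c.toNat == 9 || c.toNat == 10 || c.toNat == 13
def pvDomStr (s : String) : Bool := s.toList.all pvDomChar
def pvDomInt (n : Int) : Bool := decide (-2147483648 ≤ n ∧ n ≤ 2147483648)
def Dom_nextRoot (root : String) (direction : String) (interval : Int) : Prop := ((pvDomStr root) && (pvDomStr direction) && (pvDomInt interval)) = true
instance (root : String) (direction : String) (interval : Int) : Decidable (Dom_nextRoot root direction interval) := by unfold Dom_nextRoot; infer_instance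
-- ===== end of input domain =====

-- B replaces A's per-semitone loop by one closed-form modular lookup (objective: simpler).

-- ===== PORT A =====
def pvSharps : List String := ["G", "G#", "A", "A#", "B", "C", "C#", "D", "D#", "E", "F", "F#"]

def pvFlats : List String := ["G", "Ab", "A", "Bb", "B", "C", "Db", "D", "Eb", "E", "F", "Gb"]

-- one iteration of A's loop body: root = notes[(notes.index(root)+1)%len(notes)]
-- (when notes.index raises ValueError in Python, index? is none; such inputs are outside Pre_)
def pvStep (notes : List String) (r : String) : String :=
  match PySem.List.index? notes r with
  | some i => (PySem.List.pyGet? notes (PySem.Int.mod ((i : Int) + 1) (notes.length : Int))).getD r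
  | none => r

def nextRoot (root : String) (direction : String) (interval : Int) : String :=
  let notes := if PySem.Str.isIn "b" root then pvFlats else pvSharps
  let interval := if direction == "Down" then 12 - interval else interval
  (PySem.List.pyRange 0 interval 1).foldl (fun r _ => pvStep notes r) root

-- ===== PORT B =====
def nextRoot_alt (root : String) (direction : String) (interval : Int) : String :=
  let notes := if PySem.Str.isIn "b" root then pvFlats else pvSharps
  let steps := if direction == "Down" then 12 - interval else interval
  if steps ≤ 0 then root
  else
    match PySem.List.index? notes root with
    | some i => (PySem.List.pyGet? notes (PySem.Int.mod ((i : Int) + steps) 12)).getD root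
    | none => root  -- Python raises ValueError here; outside Pre_

-- ===== PRECONDITION & SPEC =====
-- Pre_ excludes exactly the inputs where A (and B) raise ValueError: the loop runs at
-- least once and root is not a note of the chosen spelling.
def Pre_nextRoot (root : String) (direction : String) (interval : Int) : Prop :=
  0 < (if direction == "Down" then 12 - interval else interval) →
    root ∈ (if PySem.Str.isIn "b" root then pvFlats else pvSharps)
instance (root : String) (direction : String) (interval : Int) : Decidable (Pre_nextRoot root direction interval) := by unfold Pre_nextRoot; infer_instance

def pvWitness_nextRoot : String × String × Int := ("C", "Up", 2)

def Spec_nextRoot (root : String) (direction : String) (interval : Int) (out : String) : Prop := out = nextRoot_alt root direction interval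
instance (root : String) (direction : String) (interval : Int) (out : String) : Decidable (Spec_nextRoot root direction interval out) := by unfold Spec_nextRoot; infer_instance

-- ===== CLAIM (what is proved, stated in full; the proofs are below) =====
def Claim_equal_nextRoot : Prop := ∀ (root : String) (direction : String) (interval : Int), Dom_nextRoot root direction interval → Pre_nextRoot root direction interval → Spec_nextRoot root direction interval (nextRoot root direction interval)

-- ===== LEMMAS AND PROOFS =====

-- folding a constant-step function is iteration
theorem pvFoldl_const {α β : Type} (f : α → α) (l : List β) (a : α) :
    l.foldl (fun r _ => f r) a = f^[l.length] a := by
  induction l generalizing a with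
  | nil => rfl
  | cons x xs ih => simp [List.foldl_cons, ih, Function.iterate_succ_apply]

-- one step of A's loop moves a note of index j to the note of index (j+1)%12
theorem pvStep_sharps : ∀ j : Fin 12, pvStep pvSharps (pvSharps.getD j.val "") = pvSharps.getD ((j.val + 1) % 12) "" := by decide

theorem pvStep_flats : ∀ j : Fin 12, pvStep pvFlats (pvFlats.getD j.val "") = pvFlats.getD ((j.val + 1) % 12) "" := by decide

theorem pvIter (notes : List String) (hn : notes = pvSharps ∨ notes = pvFlats) :
    ∀ (n j : Nat), j < 12 →
      (pvStep notes)^[n] (notes.getD j "") = notes.getD ((j + n) % 12) "" := by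
  intro n
  induction n with
  | zero => intro j hj; simp [Nat.mod_eq_of_lt hj]
  | succ n ih =>
    intro j hj
    rw [Function.iterate_succ_apply]
    have hstep : pvStep notes (notes.getD j "") = notes.getD ((j + 1) % 12) "" := by
      rcases hn with h | h <;> subst h
      · exact pvStep_sharps ⟨j, hj⟩
      · exact pvStep_flats ⟨j, hj⟩
    rw [hstep, ih ((j + 1) % 12) (Nat.mod_lt _ (by omega))]
    congr 1
    omega

-- ===== VERDICT (by name: the statement is the Claim_ definition above) =====
theorem nextRoot_spec : Claim_equal_nextRoot := by
  intro root direction interval _ hpre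
  unfold Spec_nextRoot nextRoot nextRoot_alt
  simp only []
  set notes := if PySem.Str.isIn "b" root then pvFlats else pvSharps with hnotes
  have hn : notes = pvSharps ∨ notes = pvFlats := by
    rw [hnotes]; split <;> simp
  have hlen : notes.length = 12 := by rcases hn with h | h <;> simp [h, pvSharps, pvFlats]
  set steps := if direction == "Down" then 12 - interval else interval with hsteps
  by_cases hle : steps ≤ 0
  · rw [PySem.List.pyRange_one_eq_nil (by omega)]
    simp [hle]
  · push_neg at hle
    have h0 : ¬ steps ≤ 0 := by omega
    have hmem : root ∈ notes := hpre hle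
    have hidx : (PySem.List.index? notes root).isSome := by
      rw [PySem.List.index?_isSome_iff]; exact hmem
    obtain ⟨i, hi⟩ := Option.isSome_iff_exists.mp hidx
    obtain ⟨hilt, hroot, -⟩ := PySem.List.getElem_of_index?_eq_some hi
    rw [pvFoldl_const, PySem.List.length_pyRange_one]
    have hA : (pvStep notes)^[(steps - 0).toNat] root
        = notes.getD ((i + steps.toNat) % 12) "" := by
      have hroot' : root = notes.getD i "" := by
        rw [List.getD_eq_getElem notes "" hilt, hroot]
      rw [hroot', pvIter notes hn _ i (by omega)]
      congr 1
      omega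
    rw [hA]
    simp only [if_neg h0, hi]
    have hmod : PySem.Int.mod ((i : Int) + steps) 12 = (((i + steps.toNat) % 12 : Nat) : Int) := by
      rw [show (i : Int) + steps = ((i + steps.toNat : Nat) : Int) by omega,
          PySem.Int.mod_eq_emod_of_pos (by omega)]
      omega
    rw [hmod, PySem.List.pyGet?_natCast]
    have hlt : (i + steps.toNat) % 12 < notes.length := by omega
    rw [List.getElem?_eq_getElem hlt, Option.getD_some,
        List.getD_eq_getElem notes "" (by omega)]
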